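-- pv_equiv track=rewrite | github.com/jina0924/Algorithm | 백준/Silver/1244. 스위치 켜고 끄기/스위치 켜고 끄기.py | switch_girl
-- ===== SOURCE A (Python) =====
-- def switch_girl(arr, pos):
--     left = right = pos-1
--     while left >= 0 and right < len(arr):
--         if arr[left] and arr[right]:
--             arr[left] = 0
--             arr[right] = 0
--             left -= 1
--             right += 1
--         elif arr[left] == 0 and arr[right] == 0:
--             arr[left] = 1
--             arr[right] = 1
--             left -= 1
--             right += 1
--         else:
--             break
--     return arr
-- ===== SOURCE B (Python) =====
-- def switch_girl(arr, pos):
--     # Two-phase rewrite: measure the symmetric flip radius first, then build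
--     # the result in one comprehension. Unlike A (which mutates arr in place),
--     # B returns a fresh list; return values are identical.
--     c = pos - 1
--     n = len(arr)
--     r = 0
--     while c - r >= 0 and c + r < n and (arr[c - r] != 0) == (arr[c + r] != 0):
--         r += 1
--     return [(0 if x else 1) if abs(j - c) < r else x for j, x in enumerate(arr)]
-- ===== Notes on version B (the rewrite author's own statement) =====
-- stated objective: alternative
-- what changed: A's single measure-and-mutate outward while loop is split into a pure radius-measuring loop over the original array followed by a one-pass comprehension that flips every index within the radius; B does not mutate its argument.
import Mathlib
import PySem

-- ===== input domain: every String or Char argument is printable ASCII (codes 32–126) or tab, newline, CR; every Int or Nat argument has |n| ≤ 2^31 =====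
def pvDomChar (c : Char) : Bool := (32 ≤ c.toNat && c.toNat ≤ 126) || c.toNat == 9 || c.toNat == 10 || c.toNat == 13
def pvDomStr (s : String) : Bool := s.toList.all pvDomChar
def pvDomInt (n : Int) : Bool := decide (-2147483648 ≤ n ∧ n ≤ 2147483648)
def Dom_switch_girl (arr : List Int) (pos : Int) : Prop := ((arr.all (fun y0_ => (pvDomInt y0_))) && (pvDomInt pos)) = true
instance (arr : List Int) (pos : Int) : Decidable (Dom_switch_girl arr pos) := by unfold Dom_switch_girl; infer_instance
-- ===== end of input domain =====

-- B splits A's measure-and-mutate loop into a pure radius measurement plus one flipping pass;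
-- A mutates its argument in place while B builds a fresh list, so the equivalence is about the return value.

-- ===== PORT A =====
-- the while loop of A: state (arr, left, right), mutation via pySetD (indices guarded in range)
def switchLoop (arr : List Int) (left right : Int) : List Int :=
  if h : left ≥ 0 ∧ right < (arr.length : Int) then
    if PySem.List.pyGetD arr left 0 ≠ 0 ∧ PySem.List.pyGetD arr right 0 ≠ 0 then
      switchLoop (PySem.List.pySetD (PySem.List.pySetD arr left 0) right 0) (left - 1) (right + 1)
    else if PySem.List.pyGetD arr left 0 = 0 ∧ PySem.List.pyGetD arr right 0 = 0 then
      switchLoop (PySem.List.pySetD (PySem.List.pySetD arr left 1) right 1) (left - 1) (right + 1)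
    else arr
  else arr
termination_by (((arr.length : Int) + 1) - right).toNat
decreasing_by
  all_goals simp only [PySem.List.length_pySetD]; omega

def switch_girl (arr : List Int) (pos : Int) : List Int :=
  switchLoop arr (pos - 1) (pos - 1)

-- ===== PORT B =====
-- B's radius-measuring while loop (reads the original array only)
def radLoop (arr : List Int) (c r : Int) : Int :=
  if h : c - r ≥ 0 ∧ c + r < (arr.length : Int) ∧
      ((PySem.List.pyGetD arr (c - r) 0 ≠ 0) ↔ (PySem.List.pyGetD arr (c + r) 0 ≠ 0)) then
    radLoop arr c (r + 1)
  else r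
termination_by (((arr.length : Int) + 1) - (c + r)).toNat
decreasing_by omega

def switch_girl_alt (arr : List Int) (pos : Int) : List Int :=
  let c := pos - 1
  let r := radLoop arr c 0
  (PySem.List.enumerate arr 0).map (fun jx => if |jx.1 - c| < r then (if jx.2 ≠ 0 then 0 else 1) else jx.2)

-- ===== PRECONDITION & SPEC =====
def Spec_switch_girl (arr : List Int) (pos : Int) (out : List Int) : Prop := out = switch_girl_alt arr pos
instance (arr : List Int) (pos : Int) (out : List Int) : Decidable (Spec_switch_girl arr pos out) := by unfold Spec_switch_girl; infer_instance

-- ===== CLAIM (what is proved, stated in full; the proofs are below) =====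
def Claim_equal_switch_girl : Prop := ∀ (arr : List Int) (pos : Int), Dom_switch_girl arr pos → Spec_switch_girl arr pos (switch_girl arr pos)

-- ===== LEMMAS AND PROOFS =====

-- the array obtained by flipping every entry within radius r of center c (B's output shape)
def flipBand (arr : List Int) (c r : Int) : List Int :=
  (PySem.List.enumerate arr 0).map (fun jx => if |jx.1 - c| < r then (if jx.2 ≠ 0 then 0 else 1) else jx.2)

theorem length_flipBand (arr : List Int) (c r : Int) : (flipBand arr c r).length = arr.length := by
  simp [flipBand, PySem.List.length_enumerate]

theorem getElem_flipBand (arr : List Int) (c r : Int) (j : Nat) (hj : j < arr.length) :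
    (flipBand arr c r)[j]'(by simpa [length_flipBand] using hj) =
      if |(j : Int) - c| < r then (if arr[j] ≠ 0 then 0 else 1) else arr[j] := by
  simp [flipBand, PySem.List.getElem_enumerate]

theorem flipBand_zero (arr : List Int) (c : Int) : flipBand arr c 0 = arr := by
  apply List.ext_getElem
  · simp [length_flipBand]
  · intro j hj hj'
    rw [getElem_flipBand arr c 0 j hj']
    have : ¬ |(j : Int) - c| < 0 := not_lt.mpr (abs_nonneg _)
    simp [this]

theorem pyGetD_flipBand (arr : List Int) (c r i : Int) (h0 : 0 ≤ i) (h1 : i < (arr.length : Int)) :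
    PySem.List.pyGetD (flipBand arr c r) i 0 =
      if |i - c| < r then (if PySem.List.pyGetD arr i 0 ≠ 0 then 0 else 1) else PySem.List.pyGetD arr i 0 := by
  rw [PySem.List.pyGetD_eq_getElem (flipBand arr c r) 0 h0 (by simpa [length_flipBand] using h1),
      PySem.List.pyGetD_eq_getElem arr 0 h0 h1]
  have hi : (i.toNat : Int) = i := Int.toNat_of_nonneg h0
  rw [getElem_flipBand arr c r i.toNat (by omega), hi]

theorem flipBand_step (arr : List Int) (c k : Int) (hk : 0 ≤ k)
    (h0 : 0 ≤ c - k) (h1 : c + k < (arr.length : Int)) (vl vr : Int)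
    (hvl : vl = (if PySem.List.pyGetD arr (c - k) 0 ≠ 0 then 0 else 1))
    (hvr : vr = (if PySem.List.pyGetD arr (c + k) 0 ≠ 0 then 0 else 1)) :
    PySem.List.pySetD (PySem.List.pySetD (flipBand arr c k) (c - k) vl) (c + k) vr
      = flipBand arr c (k + 1) := by
  rw [PySem.List.pySetD_of_nonneg _ _ (by omega : (0:Int) ≤ c - k),
      PySem.List.pySetD_of_nonneg _ _ (by omega : (0:Int) ≤ c + k)]
  have hget : ∀ (i : Int) (hi : 0 ≤ i) (hi' : i < (arr.length : Int)),
      PySem.List.pyGetD arr i 0 = arr[i.toNat]'(by omega) := by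
    intro i hi hi'
    rw [PySem.List.pyGetD_eq_getElem arr 0 hi hi']
  apply List.ext_getElem
  · simp [length_flipBand]
  · intro j hj hj'
    have hjlen : j < arr.length := by simpa [length_flipBand] using hj'
    simp only [List.getElem_set]
    rw [getElem_flipBand arr c (k + 1) j hjlen]
    by_cases hR : (c + k).toNat = j
    · subst hR
      have hb : |((c + k).toNat : Int) - c| < k + 1 := by rw [abs_sub_lt_iff]; omega
      rw [if_pos rfl, if_pos hb, hvr, hget (c + k) (by omega) h1]
    · rw [if_neg hR]
      by_cases hL : (c - k).toNat = j
      · subst hL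
        have hb : |((c - k).toNat : Int) - c| < k + 1 := by rw [abs_sub_lt_iff]; omega
        rw [if_pos rfl, if_pos hb, hvl, hget (c - k) (by omega) (by omega)]
      · rw [if_neg hL, getElem_flipBand arr c k j hjlen]
        by_cases hb : |(j : Int) - c| < k
        · have hb1 : |(j : Int) - c| < k + 1 := by rw [abs_sub_lt_iff] at hb ⊢; omega
          rw [if_pos hb, if_pos hb1]
        · have hb1 : ¬ |(j : Int) - c| < k + 1 := by rw [abs_sub_lt_iff] at hb ⊢; omega
          rw [if_neg hb, if_neg hb1]

theorem main_invariant (arr : List Int) :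
    ∀ (m : Nat) (c k : Int), 0 ≤ k → (((arr.length : Int) + 1) - (c + k)).toNat = m →
      switchLoop (flipBand arr c k) (c - k) (c + k) = flipBand arr c (radLoop arr c k) := by
  intro m
  induction m using Nat.strong_induction_on with
  | _ m ih =>
    intro c k hk hm
    rw [switchLoop, radLoop]
    by_cases hg : 0 ≤ c - k ∧ c + k < (arr.length : Int)
    · have hlen : c + k < ((flipBand arr c k).length : Int) := by
        rw [length_flipBand]; exact hg.2
      have habs : ¬ |(c - k) - c| < k := by rw [abs_sub_lt_iff]; omega
      have habs' : ¬ |(c + k) - c| < k := by rw [abs_sub_lt_iff]; omega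
      have hgl : PySem.List.pyGetD (flipBand arr c k) (c - k) 0 = PySem.List.pyGetD arr (c - k) 0 := by
        rw [pyGetD_flipBand arr c k (c - k) (by omega) (by omega), if_neg habs]
      have hgr : PySem.List.pyGetD (flipBand arr c k) (c + k) 0 = PySem.List.pyGetD arr (c + k) 0 := by
        rw [pyGetD_flipBand arr c k (c + k) (by omega) (by omega), if_neg habs']
      rw [dif_pos ⟨by omega, hlen⟩, hgl, hgr]
      set al := PySem.List.pyGetD arr (c - k) 0 with hal
      set ar := PySem.List.pyGetD arr (c + k) 0 with har
      by_cases h1 : al ≠ 0 ∧ ar ≠ 0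
      · rw [if_pos h1, dif_pos ⟨by omega, by omega, by simp [h1.1, h1.2]⟩]
        rw [flipBand_step arr c k hk (by omega) (by omega) 0 0
              (by simp [← hal, h1.1]) (by simp [← har, h1.2])]
        have : c - k - 1 = c - (k + 1) := by ring
        rw [this]
        have : c + k + 1 = c + (k + 1) := by ring
        rw [this]
        exact ih _ (by omega) c (k + 1) (by omega) rfl
      · rw [if_neg h1]
        by_cases h2 : al = 0 ∧ ar = 0
        · rw [if_pos h2, dif_pos ⟨by omega, by omega, by simp [h2.1, h2.2]⟩]
          rw [flipBand_step arr c k hk (by omega) (by omega) 1 1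
                (by simp [← hal, h2.1]) (by simp [← har, h2.2])]
          have : c - k - 1 = c - (k + 1) := by ring
          rw [this]
          have : c + k + 1 = c + (k + 1) := by ring
          rw [this]
          exact ih _ (by omega) c (k + 1) (by omega) rfl
        · rw [if_neg h2, dif_neg]
          intro hcon
          have hiff := hcon.2.2
          tauto
    · rw [dif_neg, dif_neg]
      · intro hcon; exact hg ⟨hcon.1, hcon.2.1⟩
      · intro hcon
        apply hg
        constructor
        · omega
        · have := hcon.2
          rw [length_flipBand] at this
          omega

-- ===== VERDICT (by name: the statement is the Claim_ definition above) =====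
theorem switch_girl_spec : Claim_equal_switch_girl := by
  intro arr pos _
  unfold Spec_switch_girl switch_girl switch_girl_alt
  have h := main_invariant arr ((((arr.length : Int) + 1) - ((pos - 1) + 0)).toNat) (pos - 1) 0
    (le_refl 0) rfl
  simp only [flipBand_zero, Int.sub_zero, Int.add_zero] at h
  rw [h]
  rfl
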